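-- pv_equiv track=rewrite | github.com/BaritoneBeard/CribbageGame | scoring.py | calc_pairs
-- ===== SOURCE A (Python) =====
-- def calc_pairs(card_list: list):
--     score = 0
--     while card_list:
--         head = card_list[0]
--         original_size = len(card_list)
--         card_list = filter(lambda val: val != head, card_list)  # delete every element that matches head, including head
--         card_list = list(card_list)
--         n = (original_size - len(card_list)) - 1  # removes duplicates AND the card being compared, so we subtract 1
--         score += (n ** 2 + n)  # again, 2, 6, 12
--     return score
-- ===== SOURCE B (Python) =====
-- def calc_pairs(card_list: list):
--     # Pairwise scan: peel one card at a time and compare it with every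
--     # remaining card; each equal pair scores 2.
--     score = 0
--     rest = list(card_list)
--     while rest:
--         x = rest.pop(0)
--         for y in rest:
--             if y == x:
--                 score += 2
--     return score
-- ===== Notes on version B (the rewrite author's own statement) =====
-- stated objective: alternative
-- what changed: B scores 2 for each equal pair found by a head-vs-rest pairwise scan, instead of A's repeated rebuild-the-list filter-by-value grouping with the k^2+k arithmetic formula.
import Mathlib
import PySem

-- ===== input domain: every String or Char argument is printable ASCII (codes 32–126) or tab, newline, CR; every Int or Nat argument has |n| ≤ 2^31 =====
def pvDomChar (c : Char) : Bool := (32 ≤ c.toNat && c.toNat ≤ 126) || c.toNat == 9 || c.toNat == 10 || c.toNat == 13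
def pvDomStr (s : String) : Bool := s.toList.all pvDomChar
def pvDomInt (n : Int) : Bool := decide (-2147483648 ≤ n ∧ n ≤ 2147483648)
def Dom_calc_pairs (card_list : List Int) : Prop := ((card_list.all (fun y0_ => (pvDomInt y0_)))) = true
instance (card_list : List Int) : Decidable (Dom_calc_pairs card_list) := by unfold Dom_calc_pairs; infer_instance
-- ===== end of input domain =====

-- B replaces A's filter-by-value grouping (k^2+k per value) with a head-vs-rest pairwise scan adding 2 per equal pair (alternative decomposition, same cost).
-- ===== PORT A =====
def calcPairsLoop : List Int → Int → Int
  | [], score => score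
  | head :: tail, score =>
    let originalSize : Int := ((head :: tail).length : Int)
    let cl' := (head :: tail).filter (fun v => decide (v ≠ head))
    let n : Int := (originalSize - (cl'.length : Int)) - 1
    calcPairsLoop cl' (score + (n ^ 2 + n))
termination_by cl _ => cl.length
decreasing_by
  simp only [List.filter_cons, ne_eq, not_true_eq_false, decide_false, Bool.false_eq_true,
    if_false, List.length_cons]
  exact Nat.lt_succ_of_le (List.length_filter_le _ _)

def calc_pairs (card_list : List Int) : Int := calcPairsLoop card_list 0

-- ===== PORT B =====
def calcPairsAltLoop : List Int → Int → Int
  | [], score => score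
  | x :: rest, score =>
    calcPairsAltLoop rest (rest.foldl (fun s y => if y == x then s + 2 else s) score)

def calc_pairs_alt (card_list : List Int) : Int := calcPairsAltLoop card_list 0

-- ===== PRECONDITION & SPEC =====
def Spec_calc_pairs (card_list : List Int) (out : Int) : Prop := out = calc_pairs_alt card_list
instance (card_list : List Int) (out : Int) : Decidable (Spec_calc_pairs card_list out) := by unfold Spec_calc_pairs; infer_instance

-- ===== CLAIM (what is proved, stated in full; the proofs are below) =====
def Claim_equal_calc_pairs : Prop := ∀ (card_list : List Int), Dom_calc_pairs card_list → Spec_calc_pairs card_list (calc_pairs card_list)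

-- ===== LEMMAS AND PROOFS =====

-- ===== VERDICT (by name: the statement is the Claim_ definition above) =====
-- helper used only by the proofs: 2 * (ordered equal pairs seen head-vs-tail)
def pairSum : List Int → Int
  | [] => 0
  | h :: t => 2 * (t.count h : Int) + pairSum t

theorem foldl_if_count (x : Int) : ∀ (l : List Int) (s : Int),
    l.foldl (fun s y => if y == x then s + 2 else s) s = s + 2 * (l.count x : Int) := by
  intro l
  induction l with
  | nil => intro s; simp
  | cons a t ih =>
    intro s
    simp only [List.foldl]
    by_cases h : a = x
    · subst h
      rw [if_pos (by simp), ih, List.count_cons_self]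
      push_cast; ring
    · rw [if_neg (by simp [h]), ih, List.count_cons]
      simp [h]

theorem altLoop_eq : ∀ (l : List Int) (s : Int), calcPairsAltLoop l s = s + pairSum l := by
  intro l
  induction l with
  | nil => intro s; simp [calcPairsAltLoop, pairSum]
  | cons x t ih =>
    intro s
    simp only [calcPairsAltLoop, ih, foldl_if_count, pairSum]
    ring

theorem count_filter_ne (h : Int) : ∀ (l : List Int) (a : Int), a ≠ h →
    (l.filter (fun v => decide (v ≠ h))).count a = l.count a := by
  intro l
  induction l with
  | nil => intro a _; simp
  | cons b t ih =>
    intro a ha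
    by_cases hb : b = h
    · subst hb
      simp only [List.filter_cons, decide_eq_true_eq, ne_eq, not_true_eq_false, decide_false,
        Bool.false_eq_true, if_false]
      rw [ih a ha, List.count_cons]
      simp [Ne.symm ha]
    · simp only [List.filter_cons, ne_eq, hb, not_false_eq_true, decide_true, if_true]
      rw [List.count_cons, List.count_cons, ih a ha]

theorem pairSum_filter (h : Int) : ∀ (l : List Int),
    pairSum l = pairSum (l.filter (fun v => decide (v ≠ h)))
      + ((l.count h : Int) ^ 2 - (l.count h : Int)) := by
  intro l
  induction l with
  | nil => simp [pairSum]
  | cons b t ih =>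
    by_cases hb : b = h
    · subst hb
      simp only [List.filter_cons, ne_eq, not_true_eq_false, decide_false, Bool.false_eq_true,
        if_false, pairSum, List.count_cons_self]
      rw [ih]
      push_cast
      ring
    · simp only [List.filter_cons, ne_eq, hb, not_false_eq_true, decide_true, if_true, pairSum]
      rw [List.count_cons, count_filter_ne h t b hb, ih]
      simp [hb]
      ring

theorem length_filter_count (h : Int) : ∀ (t : List Int),
    (t.filter (fun v => decide (v ≠ h))).length + t.count h = t.length := by
  intro t
  induction t with
  | nil => simp
  | cons b t ih =>
    by_cases hb : b = h
    · subst hb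
      simp only [List.filter_cons, ne_eq, not_true_eq_false, decide_false, Bool.false_eq_true,
        if_false, List.count_cons_self, List.length_cons]
      simp only [ne_eq] at ih
      omega
    · simp only [List.filter_cons, ne_eq, hb, not_false_eq_true, decide_true, if_true,
        List.count_cons, List.length_cons]
      simp only [beq_iff_eq, hb, if_false, ne_eq] at ih ⊢
      omega

theorem loopA_eq (l : List Int) (s : Int) : calcPairsLoop l s = s + pairSum l := by
  induction l, s using calcPairsLoop.induct with
  | case1 s => simp [calcPairsLoop, pairSum]
  | case2 head tail s oS cl' n ih =>
    have hc : cl' = tail.filter (fun v => decide (v ≠ head)) := by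
      show (head :: tail).filter (fun v => decide (v ≠ head)) = _
      simp [List.filter_cons]
    have hlen := length_filter_count head tail
    set k : Int := (tail.count head : Int) with hk
    have hn : n = k := by
      show ((((head :: tail).length : Int) - ((cl'.length : Int))) - 1) = k
      rw [hc]
      simp only [List.length_cons]
      push_cast
      omega
    rw [calcPairsLoop]
    rw [ih, hn, hc]
    have hps := pairSum_filter head tail
    have : pairSum (head :: tail) = 2 * k + pairSum tail := rfl
    rw [this, hps]
    ring

theorem calc_pairs_spec : Claim_equal_calc_pairs := by
  intro l _
  unfold Spec_calc_pairs calc_pairs calc_pairs_alt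
  rw [loopA_eq, altLoop_eq]
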